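-- pv_equiv track=rewrite | github.com/Vangmay/LA-Hacks | backend/agents/tex_parser.py | _read_braced
-- ===== SOURCE A (Python) =====
-- from typing import Any, Dict, List, Optional, Tuple
--
-- def _read_braced(text: str, open_brace_idx: int) -> Tuple[str, int]:
--     """Read a balanced braced value starting at ``open_brace_idx``."""
--     if open_brace_idx < 0 or open_brace_idx >= len(text) or text[open_brace_idx] != "{":
--         return "", open_brace_idx
--
--     depth = 0
--     start = open_brace_idx + 1
--     idx = open_brace_idx
--     while idx < len(text):
--         char = text[idx]
--         escaped = idx > 0 and text[idx - 1] == "\\"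
--         if char == "{" and not escaped:
--             depth += 1
--         elif char == "}" and not escaped:
--             depth -= 1
--             if depth == 0:
--                 return text[start:idx], idx + 1
--         idx += 1
--     return text[start:], len(text)
-- ===== SOURCE B (Python) =====
-- def _find_close(text, j):
--     """Recursive descent: first unescaped '}' at the current nesting level from j,
--     recursing to consume each nested braced group; None if the level never closes."""
--     n = len(text)
--     while j < n:
--         ch = text[j]
--         escaped = j > 0 and text[j - 1] == "\\"
--         if ch == "}" and not escaped:
--             return j
--         if ch == "{" and not escaped:
--             inner = _find_close(text, j + 1)
--             if inner is None:
--                 return None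
--             j = inner + 1
--         else:
--             j += 1
--     return None
--
--
-- def _read_braced(text, open_brace_idx):
--     if open_brace_idx < 0 or open_brace_idx >= len(text) or text[open_brace_idx] != "{":
--         return "", open_brace_idx
--     close = _find_close(text, open_brace_idx + 1)
--     if close is None:
--         return text[open_brace_idx + 1:], len(text)
--     return text[open_brace_idx + 1:close], close + 1
-- ===== Notes on version B (the rewrite author's own statement) =====
-- stated objective: alternative
-- what changed: A's single while-loop carrying an integer depth counter is replaced by a recursive-descent reader: a helper scans for the close of the current level and recurses to consume each nested braced group, so no depth counter exists anywhere.
-- intended difference: When the opening brace at open_brace_idx is itself preceded by a backslash (and some later unescaped '}' brings the brace balance after it to zero or below), A's counter never counts the opener and returns a mis-bounded slice ending at a later, unrelated close (or the unterminated-fallback slice), while B returns the braced substring up to the first matching unescaped '}', which is the intended 'read the braced value'. — e.g. on _read_braced("\\{a}", 1): A returns ("a}", 4), B returns ("a", 4)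
import Mathlib
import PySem

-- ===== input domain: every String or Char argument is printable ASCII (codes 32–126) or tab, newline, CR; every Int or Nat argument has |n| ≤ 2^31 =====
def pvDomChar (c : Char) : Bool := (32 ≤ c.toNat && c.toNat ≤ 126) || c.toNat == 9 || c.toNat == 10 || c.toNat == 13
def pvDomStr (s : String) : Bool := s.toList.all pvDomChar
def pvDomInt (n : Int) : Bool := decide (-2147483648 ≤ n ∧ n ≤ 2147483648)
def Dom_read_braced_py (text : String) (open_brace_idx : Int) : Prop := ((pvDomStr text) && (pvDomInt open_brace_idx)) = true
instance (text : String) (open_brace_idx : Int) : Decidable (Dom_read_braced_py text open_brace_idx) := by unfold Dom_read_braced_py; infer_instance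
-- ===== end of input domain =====

-- B replaces A's depth-counter while-loop by a recursive-descent reader (a helper recursing into
-- each nested group); on an escaped opening brace B returns the literal braced group where A
-- miscounts (see D_ below).  Objective: alternative.

-- shared character tests (the Python expressions `text[j] == c` / `escaped`)
def pvEsc (cs : List Char) (j : Nat) : Bool := decide (0 < j) && (cs.getD (j - 1) ' ' == '\\')
def pvUOpen (cs : List Char) (j : Nat) : Bool := (cs.getD j ' ' == '{') && !pvEsc cs j
def pvUClose (cs : List Char) (j : Nat) : Bool := (cs.getD j ' ' == '}') && !pvEsc cs j
-- brace-balance of the unescaped braces in [a, b): used by D_ (a counting condition on the input)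
def pvStep (cs : List Char) (j : Nat) : Int := if pvUOpen cs j then 1 else if pvUClose cs j then -1 else 0
def pvBal (cs : List Char) (a b : Nat) : Int := ((List.range' a (b - a)).map (pvStep cs)).sum

-- ===== PORT A =====
-- A's while-loop; fuel = remaining characters makes the recursion structural (loop state idx, depth);
-- the fallback return does not mention idx, so fuel 0 and idx ≥ len return the same value.
def readA_loop (cs : List Char) (start : Nat) : Nat → Nat → Int → String × Int
  | Nat.succ f, idx, depth =>
    if idx < cs.length then
      if pvUOpen cs idx then readA_loop cs start f (idx + 1) (depth + 1)
      else if pvUClose cs idx then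
        if depth - 1 = 0 then
          (String.ofList (PySem.List.slice cs (some (start : Int)) (some (idx : Int))), (idx : Int) + 1)
        else readA_loop cs start f (idx + 1) (depth - 1)
      else readA_loop cs start f (idx + 1) depth
    else (String.ofList (PySem.List.slice cs (some (start : Int)) none), (cs.length : Int))
  | 0, _, _ => (String.ofList (PySem.List.slice cs (some (start : Int)) none), (cs.length : Int))

def read_braced_py (text : String) (open_brace_idx : Int) : String × Int :=
  let cs := text.toList
  if open_brace_idx < 0 ∨ (cs.length : Int) ≤ open_brace_idx ∨
      PySem.List.pyGetD cs open_brace_idx ' ' ≠ '{' then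
    ("", open_brace_idx)
  else
    readA_loop cs (open_brace_idx.toNat + 1) cs.length open_brace_idx.toNat 0

-- ===== PORT B =====
-- B's _find_close: first unescaped '}' of the current level, recursing into nested groups;
-- fuel (length + 1, one unit per call) makes the recursion structural.
def findCloseB (cs : List Char) : Nat → Nat → Option Nat
  | Nat.succ f, j =>
    if j < cs.length then
      if pvUClose cs j then some j
      else if pvUOpen cs j then
        match findCloseB cs f (j + 1) with
        | none => none
        | some k => findCloseB cs f (k + 1)
      else findCloseB cs f (j + 1)
    else none
  | 0, _ => none

def read_braced_py_alt (text : String) (open_brace_idx : Int) : String × Int :=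
  let cs := text.toList
  if open_brace_idx < 0 ∨ (cs.length : Int) ≤ open_brace_idx ∨
      PySem.List.pyGetD cs open_brace_idx ' ' ≠ '{' then
    ("", open_brace_idx)
  else
    match findCloseB cs (cs.length + 1) (open_brace_idx.toNat + 1) with
    | none => (String.ofList (PySem.List.slice cs (some ((open_brace_idx.toNat : Int) + 1)) none), (cs.length : Int))
    | some k => (String.ofList (PySem.List.slice cs (some ((open_brace_idx.toNat : Int) + 1)) (some (k : Int))), (k : Int) + 1)

-- ===== PRECONDITION & SPEC =====
-- When the opening brace at open_brace_idx is itself preceded by a backslash (and some later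
-- unescaped '}' brings the brace balance after it to zero or below), A's counter never counts the
-- opener and returns a mis-bounded slice ending at a later, unrelated close (or the fallback),
-- while B returns the braced substring up to the first matching unescaped '}' — the intended value.
def D_read_braced_py (text : String) (open_brace_idx : Int) : Prop :=
  0 ≤ open_brace_idx ∧ open_brace_idx < (text.toList.length : Int) ∧
  text.toList.getD open_brace_idx.toNat ' ' = '{' ∧
  0 < open_brace_idx.toNat ∧ text.toList.getD (open_brace_idx.toNat - 1) ' ' = '\\' ∧
  ∃ j : Nat, j < text.toList.length ∧ open_brace_idx.toNat < j ∧
    pvUClose text.toList j = true ∧ pvBal text.toList (open_brace_idx.toNat + 1) (j + 1) ≤ 0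
instance (text : String) (open_brace_idx : Int) : Decidable (D_read_braced_py text open_brace_idx) := by unfold D_read_braced_py; infer_instance

def Spec_read_braced_py (text : String) (open_brace_idx : Int) (out : String × Int) : Prop := ¬ D_read_braced_py text open_brace_idx → out = read_braced_py_alt text open_brace_idx
instance (text : String) (open_brace_idx : Int) (out : String × Int) : Decidable (Spec_read_braced_py text open_brace_idx out) := by unfold Spec_read_braced_py; infer_instance

def pvDiffWitness_read_braced_py : String × Int := ("\\{a}", 1)
def pvDiffWitnessOut_read_braced_py : (String × Int) × (String × Int) := (("a}", 4), ("a", 4))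

-- ===== CLAIM (what is proved, stated in full; the proofs are below) =====
def Claim_unchanged_read_braced_py : Prop := ∀ (text : String) (open_brace_idx : Int), Dom_read_braced_py text open_brace_idx → Spec_read_braced_py text open_brace_idx (read_braced_py text open_brace_idx)
def Claim_exact_read_braced_py : Prop := ∀ (text : String) (open_brace_idx : Int), Dom_read_braced_py text open_brace_idx → D_read_braced_py text open_brace_idx → read_braced_py text open_brace_idx ≠ read_braced_py_alt text open_brace_idx
def Claim_changed_read_braced_py : Prop := Dom_read_braced_py (pvDiffWitness_read_braced_py.1) (pvDiffWitness_read_braced_py.2) ∧ D_read_braced_py (pvDiffWitness_read_braced_py.1) (pvDiffWitness_read_braced_py.2) ∧ read_braced_py (pvDiffWitness_read_braced_py.1) (pvDiffWitness_read_braced_py.2) = pvDiffWitnessOut_read_braced_py.1 ∧ read_braced_py_alt (pvDiffWitness_read_braced_py.1) (pvDiffWitness_read_braced_py.2) = pvDiffWitnessOut_read_braced_py.2 ∧ pvDiffWitnessOut_read_braced_py.1 ≠ pvDiffWitnessOut_read_braced_py.2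

-- ===== LEMMAS AND PROOFS =====

-- `ff cs p j`: first position in [j, length) satisfying p — the first-hit spec both ports reduce to
def ff (cs : List Char) (p : Nat → Bool) (j : Nat) : Option Nat :=
  if h : j < cs.length then (if p j then some j else ff cs p (j + 1)) else none
termination_by cs.length - j

def finishA (cs : List Char) (s : Nat) : Option Nat → String × Int
  | some k => (String.ofList (PySem.List.slice cs (some (s : Int)) (some (k : Int))), (k : Int) + 1)
  | none => (String.ofList (PySem.List.slice cs (some (s : Int)) none), (cs.length : Int))

lemma pvBal_self (cs : List Char) (a : Nat) : pvBal cs a a = 0 := by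
  simp [pvBal]

lemma pvBal_succ (cs : List Char) (a b : Nat) (h : a ≤ b) :
    pvBal cs a (b + 1) = pvBal cs a b + pvStep cs b := by
  unfold pvBal
  rw [show b + 1 - a = (b - a) + 1 by omega, List.range'_concat,
    show a + 1 * (b - a) = b by omega]
  simp

lemma pvBal_one (cs : List Char) (a : Nat) : pvBal cs a (a + 1) = pvStep cs a := by
  rw [pvBal_succ cs a a le_rfl, pvBal_self, zero_add]

lemma pvBal_split (cs : List Char) (a b c : Nat) (hab : a ≤ b) (hbc : b ≤ c) :
    pvBal cs a c = pvBal cs a b + pvBal cs b c := by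
  have hr := List.range'_append (s := a) (m := b - a) (n := c - b) (step := 1)
  rw [one_mul, show a + (b - a) = b by omega, show b - a + (c - b) = c - a by omega] at hr
  unfold pvBal
  rw [← hr, List.map_append, List.sum_append]

lemma open_not_close (cs : List Char) (j : Nat) (h : pvUOpen cs j = true) :
    pvUClose cs j = false := by
  unfold pvUOpen at h
  simp only [Bool.and_eq_true, beq_iff_eq] at h
  unfold pvUClose
  rw [h.1]
  simp

lemma close_not_open (cs : List Char) (j : Nat) (h : pvUClose cs j = true) :
    pvUOpen cs j = false := by
  unfold pvUClose at h
  simp only [Bool.and_eq_true, beq_iff_eq] at h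
  unfold pvUOpen
  rw [h.1]
  simp

lemma step_of_close (cs : List Char) (j : Nat) (h : pvUClose cs j = true) :
    pvStep cs j = -1 := by
  unfold pvStep
  rw [close_not_open cs j h, h]
  simp

lemma ff_none_of (cs : List Char) (p : Nat → Bool) (j : Nat)
    (h : ∀ m, j ≤ m → m < cs.length → p m = false) : ff cs p j = none := by
  rw [ff]
  by_cases hj : j < cs.length
  · rw [dif_pos hj, if_neg (by simp [h j le_rfl hj])]
    exact ff_none_of cs p (j + 1) (fun m hm hmn => h m (by omega) hmn)
  · rw [dif_neg hj]
termination_by cs.length - j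

lemma ff_none_forall (cs : List Char) (p : Nat → Bool) (j : Nat) (h : ff cs p j = none) :
    ∀ m, j ≤ m → m < cs.length → p m = false := by
  intro m hm hmn
  rw [ff] at h
  by_cases hj : j < cs.length
  · rw [dif_pos hj] at h
    by_cases hp : p j = true
    · rw [if_pos hp] at h; exact absurd h (by simp)
    · rw [if_neg hp] at h
      by_cases hmj : m = j
      · subst hmj; revert hp; cases p m <;> simp
      · exact ff_none_forall cs p (j + 1) h m (by omega) hmn
  · omega
termination_by cs.length - j

lemma ff_congr (cs : List Char) (p q : Nat → Bool) (j : Nat)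
    (h : ∀ m, j ≤ m → m < cs.length → p m = q m) : ff cs p j = ff cs q j := by
  conv_lhs => rw [ff]
  conv_rhs => rw [ff]
  by_cases hj : j < cs.length
  · rw [dif_pos hj, dif_pos hj, h j le_rfl hj,
      ff_congr cs p q (j + 1) (fun m hm hmn => h m (by omega) hmn)]
  · rw [dif_neg hj, dif_neg hj]
termination_by cs.length - j

lemma ff_skip (cs : List Char) (p : Nat → Bool) (j : Nat) (hp : p j = false) :
    ff cs p j = ff cs p (j + 1) := by
  rw [ff]
  by_cases hj : j < cs.length
  · rw [dif_pos hj, if_neg (by simp [hp])]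
  · rw [dif_neg hj, ff_none_of cs p (j + 1) (fun m hm hmn => absurd hmn (by omega))]

lemma ff_jump (cs : List Char) (p : Nat → Bool) (j t : Nat) (hjt : j ≤ t)
    (h : ∀ m, j ≤ m → m < t → p m = false) : ff cs p j = ff cs p t := by
  by_cases he : j = t
  · rw [he]
  · rw [ff_skip cs p j (h j le_rfl (by omega))]
    exact ff_jump cs p (j + 1) t (by omega) (fun m hm hmt => h m (by omega) hmt)
termination_by t - j

lemma ff_some (cs : List Char) (p : Nat → Bool) (j k : Nat) (h : ff cs p j = some k) :
    j ≤ k ∧ k < cs.length ∧ p k = true ∧ ∀ m, j ≤ m → m < k → p m = false := by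
  rw [ff] at h
  by_cases hj : j < cs.length
  · rw [dif_pos hj] at h
    by_cases hp : p j = true
    · rw [if_pos hp] at h
      injection h with h'
      subst h'
      exact ⟨le_rfl, hj, hp, fun m hm hmk => by omega⟩
    · rw [if_neg hp] at h
      obtain ⟨h1, h2, h3, h4⟩ := ff_some cs p (j + 1) k h
      refine ⟨by omega, h2, h3, fun m hm hmk => ?_⟩
      by_cases hmj : m = j
      · subst hmj; revert hp; cases p m <;> simp
      · exact h4 m (by omega) hmk
  · rw [dif_neg hj] at h; exact absurd h (by simp)
termination_by cs.length - j

-- the walk lemma: if no unescaped close in [a, b) lands the balance (from a) on -1, it stays ≥ 0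
lemma bal_nonneg (cs : List Char) (a : Nat) :
    ∀ b, a ≤ b → (∀ m, a ≤ m → m < b → pvUClose cs m = true → pvBal cs a (m + 1) ≠ -1) →
    0 ≤ pvBal cs a b := by
  intro b
  induction b with
  | zero => intro h _; rw [show a = 0 by omega, pvBal_self]
  | succ b ih =>
    intro hab h
    by_cases he : a = b + 1
    · rw [← he, pvBal_self]
    · have hab' : a ≤ b := by omega
      have hb : 0 ≤ pvBal cs a b := ih hab' (fun m hm hmb => h m hm (by omega))
      rw [pvBal_succ cs a b hab']
      unfold pvStep
      by_cases ho : pvUOpen cs b = true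
      · rw [if_pos ho]; omega
      · rw [if_neg ho]
        by_cases hc : pvUClose cs b = true
        · rw [if_pos hc]
          have := h b hab' (by omega) hc
          rw [pvBal_succ cs a b hab', step_of_close cs b hc] at this
          omega
        · rw [if_neg hc]; omega

-- every unescaped close in such a range itself lands ≥ 0
lemma close_land_nonneg (cs : List Char) (a b m : Nat) (ham : a ≤ m) (hmb : m < b)
    (hcl : pvUClose cs m = true)
    (h : ∀ m', a ≤ m' → m' < b → pvUClose cs m' = true → pvBal cs a (m' + 1) ≠ -1) :
    0 ≤ pvBal cs a (m + 1) := by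
  have h0 : 0 ≤ pvBal cs a m := bal_nonneg cs a m ham (fun m' hm' hm'm => h m' hm' (by omega))
  have hne := h m ham hmb hcl
  rw [pvBal_succ cs a m ham, step_of_close cs m hcl] at *
  omega

-- A's loop is the first-hit of "unescaped close landing the depth on 0"
lemma LA (cs : List Char) (s : Nat) :
    ∀ f j (d : Int), cs.length - j ≤ f →
      readA_loop cs s f j d =
        finishA cs s (ff cs (fun k => pvUClose cs k && (d + pvBal cs j (k + 1) == 0)) j) := by
  intro f
  induction f with
  | zero =>
    intro j d h
    rw [readA_loop, ff_none_of cs _ j (fun m hm hmn => by omega)]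
    rfl
  | succ f ih =>
    intro j d h
    by_cases hj : j < cs.length
    · rw [readA_loop, if_pos hj]
      have hshift : ∀ (d d' : Int), pvStep cs j = d' →
          ff cs (fun k => pvUClose cs k && ((d + d') + pvBal cs (j + 1) (k + 1) == 0)) (j + 1) =
          ff cs (fun k => pvUClose cs k && (d + pvBal cs j (k + 1) == 0)) (j + 1) := by
        intro d d' hd'
        apply ff_congr
        intro m hm hmn
        have hb : pvBal cs j (m + 1) = pvStep cs j + pvBal cs (j + 1) (m + 1) := by
          rw [pvBal_split cs j (j + 1) (m + 1) (by omega) (by omega), pvBal_one]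
        rw [hb, hd', ← add_assoc]
      by_cases ho : pvUOpen cs j = true
      · rw [if_pos ho, ih (j + 1) (d + 1) (by omega),
          hshift d 1 (by unfold pvStep; rw [if_pos ho]),
          ← ff_skip cs _ j (by simp [open_not_close cs j ho])]
      · rw [if_neg ho]
        by_cases hc : pvUClose cs j = true
        · rw [if_pos hc]
          have hbalj : pvBal cs j (j + 1) = -1 := by
            rw [pvBal_one, step_of_close cs j hc]
          by_cases hd : d - 1 = 0
          · rw [if_pos hd]
            have : ff cs (fun k => pvUClose cs k && (d + pvBal cs j (k + 1) == 0)) j = some j := by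
              rw [ff, dif_pos hj, if_pos (by rw [hbalj]; simp [hc]; omega)]
            rw [this]
            rfl
          · rw [if_neg hd, ih (j + 1) (d - 1) (by omega)]
            have h1 := hshift d (-1) (step_of_close cs j hc)
            rw [show d + -1 = d - 1 by ring] at h1
            rw [h1, ← ff_skip cs _ j (by rw [hbalj]; simp [hc]; omega)]
        · rw [if_neg hc, ih (j + 1) d (by omega)]
          have h1 := hshift d 0 (by unfold pvStep; rw [if_neg ho, if_neg hc])
          rw [show d + 0 = d by ring] at h1
          rw [h1, ← ff_skip cs _ j (by simp [hc])]
    · rw [readA_loop, if_neg hj, ff_none_of cs _ j (fun m hm hmn => by omega)]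
      rfl

-- B's recursive descent is the first-hit of "unescaped close landing the relative balance on -1"
lemma LB (cs : List Char) :
    ∀ f j, cs.length - j < f →
      findCloseB cs f j = ff cs (fun k => pvUClose cs k && (pvBal cs j (k + 1) == -1)) j := by
  intro f
  induction f with
  | zero => intro j hj; omega
  | succ f ih =>
    intro j hf
    by_cases hj : j < cs.length
    · rw [findCloseB, if_pos hj]
      by_cases hc : pvUClose cs j = true
      · rw [if_pos hc]
        have hbalj : pvBal cs j (j + 1) = -1 := by
          rw [pvBal_one, step_of_close cs j hc]
        rw [ff, dif_pos hj, if_pos (by simp [hc, hbalj])]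
      · rw [if_neg hc]
        by_cases ho : pvUOpen cs j = true
        · rw [if_pos ho]
          have hstepj : pvBal cs j (j + 1) = 1 := by
            rw [pvBal_one]; unfold pvStep; rw [if_pos ho]
          rw [ih (j + 1) (by omega)]
          cases hfc : ff cs (fun k => pvUClose cs k && (pvBal cs (j + 1) (k + 1) == -1)) (j + 1) with
          | none =>
            have hall := ff_none_forall cs _ (j + 1) hfc
            have hcl : ∀ m', j + 1 ≤ m' → m' < cs.length → pvUClose cs m' = true →
                pvBal cs (j + 1) (m' + 1) ≠ -1 := by
              intro m' h1 h2 h3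
              have := hall m' h1 h2
              simp [h3] at this
              omega
            rw [ff_none_of cs _ j ?_]
            intro m hm hmn
            by_cases hmj : m = j
            · subst hmj; simp [hc]
            · by_cases hcm : pvUClose cs m = true
              · have h0 : 0 ≤ pvBal cs (j + 1) (m + 1) :=
                  close_land_nonneg cs (j + 1) cs.length m (by omega) hmn hcm hcl
                have hb : pvBal cs j (m + 1) = pvBal cs j (j + 1) + pvBal cs (j + 1) (m + 1) :=
                  pvBal_split cs j (j + 1) (m + 1) (by omega) (by omega)
                simp only [hb, hstepj, Bool.and_eq_false_iff, beq_eq_false_iff_ne, ne_eq]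
                right
                omega
              · simp [hcm]
          | some k =>
            obtain ⟨hk1, hk2, hk3, hk4⟩ := ff_some cs _ (j + 1) k hfc
            have hkc : pvUClose cs k = true := by simp only [Bool.and_eq_true] at hk3; exact hk3.1
            have hkb : pvBal cs (j + 1) (k + 1) = -1 := by
              simp only [Bool.and_eq_true, beq_iff_eq] at hk3
              exact hk3.2
            have hcl : ∀ m', j + 1 ≤ m' → m' < k → pvUClose cs m' = true →
                pvBal cs (j + 1) (m' + 1) ≠ -1 := by
              intro m' h1 h2 h3
              have := hk4 m' h1 h2
              simp [h3] at this
              omega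
            have hjk1 : pvBal cs j (k + 1) = 0 := by
              rw [pvBal_split cs j (j + 1) (k + 1) (by omega) (by omega), hstepj, hkb]
              ring
            show findCloseB cs f (k + 1) = ff cs (fun m => pvUClose cs m && (pvBal cs j (m + 1) == -1)) j
            rw [ih (k + 1) (by omega),
              ff_jump cs (fun m => pvUClose cs m && (pvBal cs j (m + 1) == -1)) j (k + 1) (by omega) ?_]
            · apply ff_congr
              intro m hm hmn
              have hb : pvBal cs j (m + 1) = pvBal cs j (k + 1) + pvBal cs (k + 1) (m + 1) :=
                pvBal_split cs j (k + 1) (m + 1) (by omega) (by omega)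
              rw [hb, hjk1, zero_add]
            · intro m hm hmk
              by_cases hmj : m = j
              · subst hmj; simp [hc]
              · by_cases hme : m = k
                · subst hme
                  simp [hjk1]
                · by_cases hcm : pvUClose cs m = true
                  · have h0 : 0 ≤ pvBal cs (j + 1) (m + 1) :=
                      close_land_nonneg cs (j + 1) k m (by omega) (by omega) hcm hcl
                    have hb : pvBal cs j (m + 1) = pvBal cs j (j + 1) + pvBal cs (j + 1) (m + 1) :=
                      pvBal_split cs j (j + 1) (m + 1) (by omega) (by omega)
                    simp only [hb, hstepj, Bool.and_eq_false_iff, beq_eq_false_iff_ne, ne_eq]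
                    right
                    omega
                  · simp [hcm]
        · rw [if_neg ho, ih (j + 1) (by omega), ← ff_skip cs _ j (by simp [hc])]
          have hstepj : pvBal cs j (j + 1) = 0 := by
            rw [pvBal_one]; unfold pvStep; rw [if_neg ho, if_neg hc]
          rw [ff_skip cs _ j (by simp [hc]), ff_skip cs _ j (by simp [hc])]
          apply ff_congr
          intro m hm hmn
          have hb : pvBal cs j (m + 1) = pvBal cs j (j + 1) + pvBal cs (j + 1) (m + 1) :=
            pvBal_split cs j (j + 1) (m + 1) (by omega) (by omega)
          rw [hb, hstepj, zero_add]
    · rw [findCloseB, if_neg hj, ff_none_of cs _ j (fun m hm hmn => by omega)]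

-- B's top level, written through finishA (definitional case split on the match)
lemma alt_eq_finish (text : String) (o : Int)
    (hg : ¬ (o < 0 ∨ ((text.toList).length : Int) ≤ o ∨ PySem.List.pyGetD text.toList o ' ' ≠ '{')) :
    read_braced_py_alt text o =
      finishA text.toList (o.toNat + 1) (findCloseB text.toList (text.toList.length + 1) (o.toNat + 1)) := by
  unfold read_braced_py_alt
  rw [if_neg hg]
  cases findCloseB text.toList (text.toList.length + 1) (o.toNat + 1) with
  | none => simp [finishA]
  | some k => simp [finishA]

-- two different first-hit results give different outputs of the shared finisher
lemma finish_ne_none (cs : List Char) (s k : Nat) (hs : s ≤ k) (hk : k < cs.length) :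
    finishA cs s (some k) ≠ finishA cs s none := by
  intro h
  have h1 := congrArg Prod.fst h
  simp only [finishA] at h1
  rw [PySem.List.slice_natCast, PySem.List.slice_from_natCast] at h1
  have h3 : List.take (k - s) (List.drop s cs) = List.drop s cs := by
    have := congrArg String.toList h1
    simpa using this
  have hlen := congrArg List.length h3
  rw [List.length_take, List.length_drop] at hlen
  omega

lemma finish_ne_some (cs : List Char) (s : Nat) {k k' : Nat} (hne : k ≠ k') :
    finishA cs s (some k) ≠ finishA cs s (some k') := by
  intro h
  have h2 := congrArg Prod.snd h
  simp only [finishA] at h2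
  have : (k : Int) = (k' : Int) := by omega
  exact hne (by exact_mod_cast this)

-- the character at a valid opening brace is not an unescaped close
lemma opener_not_close (cs : List Char) (j : Nat) (h : cs.getD j ' ' = '{') :
    pvUClose cs j = false := by
  unfold pvUClose
  rw [h]
  simp

-- ===== VERDICT (by name: the statement is the Claim_ definition above) =====
theorem read_braced_py_spec : Claim_unchanged_read_braced_py := by
  intro text o _ hD
  by_cases hg : o < 0 ∨ ((text.toList).length : Int) ≤ o ∨ PySem.List.pyGetD text.toList o ' ' ≠ '{'
  · unfold read_braced_py read_braced_py_alt
    rw [if_pos hg, if_pos hg]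
  · rw [alt_eq_finish text o hg]
    unfold read_braced_py
    rw [if_neg hg]
    push Not at hg
    obtain ⟨h0, h1, h2⟩ := hg
    have ho0 : 0 ≤ o := by omega
    have hlt : o.toNat < text.toList.length := by omega
    have hgetn : text.toList.getD o.toNat ' ' = '{' := by
      rw [show o = ((o.toNat : Nat) : Int) by omega, PySem.List.pyGetD_natCast] at h2
      exact h2
    rw [LA text.toList (o.toNat + 1) text.toList.length o.toNat 0 (by omega),
      LB text.toList (text.toList.length + 1) (o.toNat + 1) (by omega)]
    congr 1
    rw [ff_skip text.toList _ o.toNat (by simp [opener_not_close text.toList o.toNat hgetn])]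
    by_cases hesc : pvEsc text.toList o.toNat = true
    · -- escaped opener, outside D_: every unescaped close after it keeps the balance positive,
      -- so neither first-hit exists
      have hstep : pvStep text.toList o.toNat = 0 := by
        unfold pvStep pvUOpen pvUClose
        rw [hesc]
        simp
      have hslash : text.toList.getD (o.toNat - 1) ' ' = '\\' := by
        unfold pvEsc at hesc
        simp only [Bool.and_eq_true, beq_iff_eq, decide_eq_true_eq] at hesc
        exact hesc.2
      have hpos : 0 < o.toNat := by
        unfold pvEsc at hesc
        simp only [Bool.and_eq_true, decide_eq_true_eq] at hesc
        exact hesc.1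
      have hnoj : ∀ j, j < text.toList.length → o.toNat < j → pvUClose text.toList j = true →
          0 < pvBal text.toList (o.toNat + 1) (j + 1) := by
        intro j hj1 hj2 hj3
        by_contra hb
        exact hD ⟨ho0, by exact_mod_cast h1, hgetn, hpos, hslash, j, hj1, hj2, hj3, by omega⟩
      have hAnone : ff text.toList
          (fun k => pvUClose text.toList k && ((0 : Int) + pvBal text.toList o.toNat (k + 1) == 0))
          (o.toNat + 1) = none := by
        apply ff_none_of
        intro m hm hmn
        by_cases hcm : pvUClose text.toList m = true
        · have h3 := hnoj m hmn (by omega) hcm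
          have hb : pvBal text.toList o.toNat (m + 1) =
              pvStep text.toList o.toNat + pvBal text.toList (o.toNat + 1) (m + 1) := by
            rw [pvBal_split text.toList o.toNat (o.toNat + 1) (m + 1) (by omega) (by omega), pvBal_one]
          simp only [hcm, Bool.true_and, hb, hstep, beq_eq_false_iff_ne, ne_eq]
          omega
        · simp [hcm]
      have hBnone : ff text.toList
          (fun k => pvUClose text.toList k && (pvBal text.toList (o.toNat + 1) (k + 1) == -1))
          (o.toNat + 1) = none := by
        apply ff_none_of
        intro m hm hmn
        by_cases hcm : pvUClose text.toList m = true
        · have h3 := hnoj m hmn (by omega) hcm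
          simp only [hcm, Bool.true_and, beq_eq_false_iff_ne, ne_eq]
          omega
        · simp [hcm]
      rw [hAnone, hBnone]
    · -- unescaped opener: A's depth-1 scan from o+1 is exactly B's find-close from o+1
      have hopen : pvUOpen text.toList o.toNat = true := by
        unfold pvUOpen
        rw [hgetn]
        simp only [Bool.not_eq_true] at hesc
        simp [hesc]
      have hstep : pvStep text.toList o.toNat = 1 := by
        unfold pvStep
        rw [if_pos hopen]
      apply ff_congr
      intro m hm hmn
      show (pvUClose text.toList m && ((0 : Int) + pvBal text.toList o.toNat (m + 1) == 0)) =
        (pvUClose text.toList m && (pvBal text.toList (o.toNat + 1) (m + 1) == -1))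
      have hb : pvBal text.toList o.toNat (m + 1) =
          pvStep text.toList o.toNat + pvBal text.toList (o.toNat + 1) (m + 1) := by
        rw [pvBal_split text.toList o.toNat (o.toNat + 1) (m + 1) (by omega) (by omega), pvBal_one]
      rw [hb, hstep]
      congr 1
      rw [Bool.eq_iff_iff]
      simp only [beq_iff_eq]
      omega

theorem read_braced_py_changed : Claim_changed_read_braced_py := by
  unfold Claim_changed_read_braced_py
  decide

theorem read_braced_py_tight : Claim_exact_read_braced_py := by
  intro text o _ hD
  obtain ⟨ho0, h1, hgetn, hpos, hslash, j, hj1, hj2, hj3, hj4⟩ := hD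
  have hg : ¬ (o < 0 ∨ ((text.toList).length : Int) ≤ o ∨ PySem.List.pyGetD text.toList o ' ' ≠ '{') := by
    push Not
    refine ⟨by omega, by omega, ?_⟩
    rw [show o = ((o.toNat : Nat) : Int) by omega, PySem.List.pyGetD_natCast]
    exact hgetn
  rw [alt_eq_finish text o hg]
  unfold read_braced_py
  rw [if_neg hg]
  have hlt : o.toNat < text.toList.length := by omega
  rw [LA text.toList (o.toNat + 1) text.toList.length o.toNat 0 (by omega),
    LB text.toList (text.toList.length + 1) (o.toNat + 1) (by omega),
    ff_skip text.toList _ o.toNat (by simp [opener_not_close text.toList o.toNat hgetn])]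
  have hesc : pvEsc text.toList o.toNat = true := by
    unfold pvEsc
    rw [hslash]
    simp [hpos]
  have hstep : pvStep text.toList o.toNat = 0 := by
    unfold pvStep pvUOpen pvUClose
    rw [hesc]
    simp
  have hA : ff text.toList
      (fun k => pvUClose text.toList k && ((0 : Int) + pvBal text.toList o.toNat (k + 1) == 0))
      (o.toNat + 1) =
      ff text.toList
      (fun k => pvUClose text.toList k && (pvBal text.toList (o.toNat + 1) (k + 1) == 0))
      (o.toNat + 1) := by
    apply ff_congr
    intro m hm hmn
    show (pvUClose text.toList m && ((0 : Int) + pvBal text.toList o.toNat (m + 1) == 0)) =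
      (pvUClose text.toList m && (pvBal text.toList (o.toNat + 1) (m + 1) == 0))
    have hb : pvBal text.toList o.toNat (m + 1) =
        pvStep text.toList o.toNat + pvBal text.toList (o.toNat + 1) (m + 1) := by
      rw [pvBal_split text.toList o.toNat (o.toNat + 1) (m + 1) (by omega) (by omega), pvBal_one]
    rw [hb, hstep]
    congr 1
    rw [Bool.eq_iff_iff]
    simp only [beq_iff_eq]
    omega
  rw [hA]
  cases hfa : ff text.toList
      (fun k => pvUClose text.toList k && (pvBal text.toList (o.toNat + 1) (k + 1) == 0))
      (o.toNat + 1) with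
  | none =>
    cases hfb : ff text.toList
        (fun k => pvUClose text.toList k && (pvBal text.toList (o.toNat + 1) (k + 1) == -1))
        (o.toNat + 1) with
    | none =>
      exfalso
      have hAall := ff_none_forall text.toList _ (o.toNat + 1) hfa
      have hBall := ff_none_forall text.toList _ (o.toNat + 1) hfb
      have hclB : ∀ m, o.toNat + 1 ≤ m → m < text.toList.length → pvUClose text.toList m = true →
          pvBal text.toList (o.toNat + 1) (m + 1) ≠ -1 := by
        intro m hma hmn hmc
        have := hBall m hma hmn
        simp [hmc] at this
        omega
      have h0 : 0 ≤ pvBal text.toList (o.toNat + 1) (j + 1) :=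
        close_land_nonneg text.toList (o.toNat + 1) text.toList.length j (by omega) hj1 hj3 hclB
      have hz : pvBal text.toList (o.toNat + 1) (j + 1) = 0 := by omega
      have := hAall j (by omega) hj1
      simp [hj3, hz] at this
    | some k' =>
      obtain ⟨hk1, hk2, _, _⟩ := ff_some text.toList _ (o.toNat + 1) k' hfb
      exact (finish_ne_none text.toList (o.toNat + 1) k' hk1 hk2).symm
  | some k =>
    obtain ⟨hk1, hk2, hk3, _⟩ := ff_some text.toList _ (o.toNat + 1) k hfa
    cases hfb : ff text.toList
        (fun k => pvUClose text.toList k && (pvBal text.toList (o.toNat + 1) (k + 1) == -1))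
        (o.toNat + 1) with
    | none => exact finish_ne_none text.toList (o.toNat + 1) k hk1 hk2
    | some k' =>
      obtain ⟨hk1', hk2', hk3', _⟩ := ff_some text.toList _ (o.toNat + 1) k' hfb
      apply finish_ne_some
      intro he
      subst he
      simp only [Bool.and_eq_true, beq_iff_eq] at hk3 hk3'
      omega
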